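-- pv_equiv track=rewrite | github.com/molbiohive/hive-browser | src/hive/parsers/genbank.py | _parse_qualifiers
-- ===== SOURCE A (Python) =====
-- def _parse_qualifiers(lines: list[str]) -> dict[str, str]:
--     """Parse qualifier lines into a dict."""
--     qualifiers: dict[str, str] = {}
--     current_key = None
--     current_val = ""
--
--     for line in lines:
--         stripped = line.strip()
--         if not stripped:
--             continue
--
--         if stripped.startswith("/"):
--             # Save previous qualifier
--             if current_key is not None:
--                 qualifiers[current_key] = current_val.strip('"')
--
--             # Parse new qualifier
--             if "=" in stripped:
--                 key, _, val = stripped[1:].partition("=")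
--                 current_key = key
--                 current_val = val.strip('"')
--             else:
--                 # Flag qualifier (e.g. /pseudo)
--                 current_key = stripped[1:]
--                 current_val = ""
--         elif current_key is not None:
--             # Continuation line
--             current_val += " " + stripped.strip('"')
--
--     # Save last qualifier
--     if current_key is not None:
--         qualifiers[current_key] = current_val.strip('"')
--
--     return qualifiers
-- ===== SOURCE B (Python) =====
-- def _parse_qualifiers(lines: list[str]) -> dict[str, str]:
--     """Two-pass rewrite: collect qualifier blocks first, then build each value."""
--     toks = [s for s in (line.strip() for line in lines) if s]
--     # drop blanks (already gone) and lines before the first '/'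
--     i = 0
--     while i < len(toks) and not toks[i].startswith("/"):
--         i += 1
--     blocks = []
--     while i < len(toks):
--         j = i + 1
--         while j < len(toks) and not toks[j].startswith("/"):
--             j += 1
--         blocks.append((toks[i], toks[i + 1:j]))
--         i = j
--     result: dict[str, str] = {}
--     for header, conts in blocks:
--         key, eq, val = header[1:].partition("=")
--         initial = val.strip('"') if eq else ""
--         parts = [initial] + [c.strip('"') for c in conts]
--         result[key] = " ".join(parts).strip('"')
--     return result
-- ===== Notes on version B (the rewrite author's own statement) =====
-- stated objective: alternative
-- what changed: Replaced the single interleaved accumulator loop (dict + current_key/current_val state) by two separate passes: one pass strips/filters lines and groups them into per-qualifier blocks, a second pass turns each block into a key and a space-joined quote-stripped value.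
import Mathlib
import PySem

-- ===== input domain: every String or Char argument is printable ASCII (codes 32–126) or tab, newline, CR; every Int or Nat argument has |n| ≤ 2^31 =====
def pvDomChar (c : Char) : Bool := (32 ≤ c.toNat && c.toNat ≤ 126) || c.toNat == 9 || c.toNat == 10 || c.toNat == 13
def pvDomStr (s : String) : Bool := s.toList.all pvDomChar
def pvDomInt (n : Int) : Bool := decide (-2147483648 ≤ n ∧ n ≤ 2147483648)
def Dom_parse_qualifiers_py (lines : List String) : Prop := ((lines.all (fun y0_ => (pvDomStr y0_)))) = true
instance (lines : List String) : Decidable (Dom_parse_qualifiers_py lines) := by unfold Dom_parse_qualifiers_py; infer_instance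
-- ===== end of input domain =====

-- B replaces A's single interleaved accumulator loop by two separate passes
-- (group stripped nonempty lines into per-qualifier blocks, then build each
-- key/value from its block); same cost, different decomposition.

-- shared small helpers (both Pythons use s.strip('"') and header.partition("="))
def pqStripQ (s : String) : String := PySem.Str.stripChars s "\""

-- hand port of s.partition("=") fused with the '"=" in s' test: 'some (before, after)'
-- at the FIRST '=' when present, 'none' when '=' does not occur — exactly Python's
-- '"=" in s' / s.partition("=") pair for the single-character separator "=".
def pqPartEq : List Char → Option (List Char × List Char)
  | [] => none
  | c :: cs =>
    if c = '=' then some ([], cs)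
    else (pqPartEq cs).map (fun p => (c :: p.1, p.2))

def pqPartition (s : String) : Option (String × String) :=
  (pqPartEq s.toList).map (fun p => (String.ofList p.1, String.ofList p.2))

-- ===== PORT A =====
-- loop body of A on the already-stripped, nonempty line
def pqStepT (st : PySem.Dict String String × Option String × String) (stripped : String) :
    PySem.Dict String String × Option String × String :=
  if PySem.Str.startswith stripped "/" then
    -- save previous qualifier
    let d : PySem.Dict String String :=
      match st.2.1 with
      | some k => st.1.insert k (pqStripQ st.2.2)
      | none => st.1
    -- parse new qualifier ('"=" in stripped' ↔ pqPartition of stripped[1:] is 'some',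
    -- since stripped starts with '/' ≠ '=')
    match pqPartition (PySem.Str.slice stripped (some 1) none) with
    | some kv => (d, some kv.1, pqStripQ kv.2)
    | none => (d, some (PySem.Str.slice stripped (some 1) none), "")
  else
    match st.2.1 with
    | some _ => (st.1, st.2.1, st.2.2 ++ " " ++ pqStripQ stripped)
    | none => st

-- one iteration of A's for-loop: strip, skip blanks, then the body above
def pqStep (st : PySem.Dict String String × Option String × String) (line : String) :
    PySem.Dict String String × Option String × String :=
  let stripped := PySem.Str.strip line
  if stripped = "" then st else pqStepT st stripped

-- the trailing 'save last qualifier' + return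
def pqFinish (st : PySem.Dict String String × Option String × String) :
    List (String × String) :=
  (match st.2.1 with
   | some k => st.1.insert k (pqStripQ st.2.2)
   | none => st.1).items

def parse_qualifiers_py (lines : List String) : List (String × String) :=
  pqFinish (lines.foldl pqStep (PySem.Dict.empty, none, ""))

-- ===== PORT B =====
def pqNotSlash (s : String) : Bool := !(PySem.Str.startswith s "/")

-- pass 1 (on tokens starting at a '/'-line): group header + continuation lines
def pqBlocks : List String → List (String × List String)
  | [] => []
  | h :: rest =>
    (h, rest.takeWhile pqNotSlash) :: pqBlocks (rest.dropWhile pqNotSlash)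
termination_by l => l.length
decreasing_by
  exact Nat.lt_succ_of_le (List.length_dropWhile_le _ _)

-- pass 2, per block: key and space-joined quote-stripped value
def pqEntry (header : String) (conts : List String) : String × String :=
  let ki : String × String :=
    match pqPartition (PySem.Str.slice header (some 1) none) with
    | some kv => (kv.1, pqStripQ kv.2)
    | none => (PySem.Str.slice header (some 1) none, "")
  (ki.1, pqStripQ (PySem.Str.join " " (ki.2 :: conts.map pqStripQ)))

def pqInsB (d : PySem.Dict String String) (b : String × List String) :
    PySem.Dict String String :=
  let e := pqEntry b.1 b.2
  d.insert e.1 e.2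

def parse_qualifiers_py_alt (lines : List String) : List (String × String) :=
  let toks := (lines.map PySem.Str.strip).filter (fun s => s ≠ "")
  let bs := pqBlocks (toks.dropWhile pqNotSlash)
  (bs.foldl pqInsB PySem.Dict.empty).items

-- ===== PRECONDITION & SPEC =====
def Spec_parse_qualifiers_py (lines : List String) (out : List (String × String)) : Prop := out = parse_qualifiers_py_alt lines
instance (lines : List String) (out : List (String × String)) : Decidable (Spec_parse_qualifiers_py lines out) := by unfold Spec_parse_qualifiers_py; infer_instance

-- ===== CLAIM (what is proved, stated in full; the proofs are below) =====
def Claim_equal_parse_qualifiers_py : Prop := ∀ (lines : List String), Dom_parse_qualifiers_py lines → Spec_parse_qualifiers_py lines (parse_qualifiers_py lines)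

-- ===== LEMMAS AND PROOFS =====

-- equation lemmas for the well-founded pqBlocks
theorem pqBlocks_nil : pqBlocks [] = [] := by rw [pqBlocks]

theorem pqBlocks_cons (h : String) (rest : List String) :
    pqBlocks (h :: rest)
      = (h, rest.takeWhile pqNotSlash) :: pqBlocks (rest.dropWhile pqNotSlash) := by
  rw [pqBlocks]

-- " ".join(v0 :: c :: cs) absorbs its first two pieces
theorem pqJoin_cons_cons (v0 c : String) (cs : List String) :
    PySem.Str.join " " (v0 :: c :: cs) = PySem.Str.join " " ((v0 ++ " " ++ c) :: cs) := by
  apply String.toList_inj.mp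
  cases cs with
  | nil =>
    simp [PySem.Str.toList_join, PySem.Chars.join_cons_cons, PySem.Chars.join_singleton]
  | cons d ds =>
    simp [PySem.Str.toList_join, PySem.Chars.join_cons_cons, List.append_assoc]

-- " ".join(v0 :: cs) is the left fold appending " " ++ c
theorem pqJoin_foldl (cs : List String) :
    ∀ v0 : String, PySem.Str.join " " (v0 :: cs) = cs.foldl (fun a c => a ++ " " ++ c) v0 := by
  induction cs with
  | nil =>
    intro v0
    apply String.toList_inj.mp
    simp [PySem.Str.toList_join, PySem.Chars.join_singleton]
  | cons c cs ih =>
    intro v0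
    rw [pqJoin_cons_cons, List.foldl_cons, ih]

-- A's fold over raw lines is a fold of the loop body over the stripped nonempty tokens
theorem pqFold_toks (lines : List String) :
    ∀ st, lines.foldl pqStep st
      = ((lines.map PySem.Str.strip).filter (fun s => s ≠ "")).foldl pqStepT st := by
  induction lines with
  | nil => intro st; rfl
  | cons l ls ih =>
    intro st
    simp only [List.foldl_cons, List.map_cons, List.filter_cons]
    by_cases h : PySem.Str.strip l = ""
    · simp [pqStep, h, ih]
    · simp [pqStep, h, ih]

-- value accumulated over continuation tokens
def pqAcc (v : String) (conts : List String) : String :=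
  conts.foldl (fun a c => a ++ " " ++ pqStripQ c) v

theorem pqEntry_val (h : String) (conts : List String) :
    pqEntry h conts
      = (match pqPartition (PySem.Str.slice h (some 1) none) with
         | some kv => (kv.1, pqStripQ (pqAcc (pqStripQ kv.2) conts))
         | none => (PySem.Str.slice h (some 1) none, pqStripQ (pqAcc "" conts))) := by
  have key : ∀ v0 : String,
      PySem.Str.join " " (v0 :: conts.map pqStripQ) = pqAcc v0 conts := by
    intro v0
    rw [pqJoin_foldl, pqAcc, List.foldl_map]
  cases hp : pqPartition (PySem.Str.slice h (some 1) none) with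
  | some kv => simp [pqEntry, hp, key]
  | none => simp [pqEntry, hp, key]

-- main invariant: from a live qualifier (d, some k, v), finishing A's fold equals
-- inserting the closed block and folding B's blocks of the remaining tokens
theorem pqMain :
    ∀ (toks : List String) (d : PySem.Dict String String) (k v : String),
      pqFinish (toks.foldl pqStepT (d, some k, v))
        = ((pqBlocks (toks.dropWhile pqNotSlash)).foldl pqInsB
            (d.insert k (pqStripQ (pqAcc v (toks.takeWhile pqNotSlash))))).items := by
  intro toks
  induction toks with
  | nil => intro d k v; simp [pqBlocks_nil, pqFinish, pqAcc]
  | cons t ts ih =>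
    intro d k v
    cases hs : PySem.Str.startswith t "/" with
    | true =>
      -- new qualifier: close the current one, open the next
      have hs' : pqNotSlash t = false := by simp only [pqNotSlash, hs, Bool.not_true]
      cases hp : pqPartition (PySem.Str.slice t (some 1) none) with
      | some kv =>
        have hstep : pqStepT (d, some k, v) t
            = (d.insert k (pqStripQ v), some kv.1, pqStripQ kv.2) := by
          simp only [pqStepT, hs, hp, if_true]
        have he : pqInsB (d.insert k (pqStripQ v)) (t, ts.takeWhile pqNotSlash)
            = (d.insert k (pqStripQ v)).insert kv.1
                (pqStripQ (List.foldl (fun a c => a ++ " " ++ pqStripQ c) (pqStripQ kv.2)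
                  (ts.takeWhile pqNotSlash))) := by
          simp [pqInsB, pqEntry_val, hp, pqAcc]
        rw [List.foldl_cons, hstep, ih]
        simp only [List.takeWhile_cons, List.dropWhile_cons, hs', Bool.false_eq_true,
          if_false, pqBlocks_cons, List.foldl_cons]
        simp [pqAcc, he]
      | none =>
        have hstep : pqStepT (d, some k, v) t
            = (d.insert k (pqStripQ v), some (PySem.Str.slice t (some 1) none), "") := by
          simp only [pqStepT, hs, hp, if_true]
        have he : pqInsB (d.insert k (pqStripQ v)) (t, ts.takeWhile pqNotSlash)
            = (d.insert k (pqStripQ v)).insert (PySem.Str.slice t (some 1) none)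
                (pqStripQ (List.foldl (fun a c => a ++ " " ++ pqStripQ c) ""
                  (ts.takeWhile pqNotSlash))) := by
          simp [pqInsB, pqEntry_val, hp, pqAcc]
        rw [List.foldl_cons, hstep, ih]
        simp only [List.takeWhile_cons, List.dropWhile_cons, hs', Bool.false_eq_true,
          if_false, pqBlocks_cons, List.foldl_cons]
        simp [pqAcc, he]
    | false =>
      -- continuation line: extend the current value
      have hs' : pqNotSlash t = true := by simp only [pqNotSlash, hs, Bool.not_false]
      have hstep : pqStepT (d, some k, v) t = (d, some k, v ++ " " ++ pqStripQ t) := by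
        simp only [pqStepT, hs]; rfl
      rw [List.foldl_cons, hstep, ih]
      simp only [List.takeWhile_cons, List.dropWhile_cons, hs', if_pos]
      simp [pqAcc]

theorem pqNone :
    ∀ (toks : List String) (d : PySem.Dict String String),
      pqFinish (toks.foldl pqStepT (d, none, ""))
        = ((pqBlocks (toks.dropWhile pqNotSlash)).foldl pqInsB d).items := by
  intro toks
  induction toks with
  | nil => intro d; simp [pqBlocks_nil, pqFinish]
  | cons t ts ih =>
    intro d
    cases hs : PySem.Str.startswith t "/" with
    | true =>
      have hs' : pqNotSlash t = false := by simp only [pqNotSlash, hs, Bool.not_true]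
      cases hp : pqPartition (PySem.Str.slice t (some 1) none) with
      | some kv =>
        have hstep : pqStepT (d, none, "") t = (d, some kv.1, pqStripQ kv.2) := by
          simp only [pqStepT, hs, hp, if_true]
        have he : pqInsB d (t, ts.takeWhile pqNotSlash)
            = d.insert kv.1 (pqStripQ (List.foldl (fun a c => a ++ " " ++ pqStripQ c)
                (pqStripQ kv.2) (ts.takeWhile pqNotSlash))) := by
          simp [pqInsB, pqEntry_val, hp, pqAcc]
        rw [List.foldl_cons, hstep, pqMain]
        simp only [List.dropWhile_cons, hs', Bool.false_eq_true,
          if_false, pqBlocks_cons, List.foldl_cons]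
        simp [pqAcc, he]
      | none =>
        have hstep : pqStepT (d, none, "") t
            = (d, some (PySem.Str.slice t (some 1) none), "") := by
          simp only [pqStepT, hs, hp, if_true]
        have he : pqInsB d (t, ts.takeWhile pqNotSlash)
            = d.insert (PySem.Str.slice t (some 1) none)
                (pqStripQ (List.foldl (fun a c => a ++ " " ++ pqStripQ c) ""
                  (ts.takeWhile pqNotSlash))) := by
          simp [pqInsB, pqEntry_val, hp, pqAcc]
        rw [List.foldl_cons, hstep, pqMain]
        simp only [List.dropWhile_cons, hs', Bool.false_eq_true,
          if_false, pqBlocks_cons, List.foldl_cons]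
        simp [pqAcc, he]
    | false =>
      have hs' : pqNotSlash t = true := by simp only [pqNotSlash, hs, Bool.not_false]
      have hstep : pqStepT (d, none, "") t = (d, none, "") := by
        simp only [pqStepT, hs]; rfl
      rw [List.foldl_cons, hstep]
      simp only [List.dropWhile_cons, hs', if_pos]
      exact ih d

-- ===== VERDICT (by name: the statement is the Claim_ definition above) =====
theorem parse_qualifiers_py_spec : Claim_equal_parse_qualifiers_py := by
  intro lines _
  unfold Spec_parse_qualifiers_py parse_qualifiers_py parse_qualifiers_py_alt
  rw [pqFold_toks, pqNone]
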